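-- pv_equiv track=rewrite | github.com/9to5ninja-projects/groundthink | archive/train_validation.py | generate_sample_text
-- ===== SOURCE A (Python) =====
-- def generate_sample_text(num_chars=50000):
--     """
--     Generate simple text for training validation.
--     Uses patterns that are easy to learn but non-trivial.
--     """
--     patterns = [
--         "The quick brown fox jumps over the lazy dog. ",
--         "Hello world! This is a test of the hybrid model. ",
--         "ABCDEFGHIJKLMNOPQRSTUVWXYZ. ",
--         "0123456789. ",
--         "The cat sat on the mat. The dog ran in the park. ",
--         "Once upon a time, in a land far away, there lived a wise old owl. ",
--         "To be or not to be, that is the question. ",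
--         "All that glitters is not gold. ",
--     ]
--
--     text = ""
--     while len(text) < num_chars:
--         for pattern in patterns:
--             text += pattern
--             if len(text) >= num_chars:
--                 break
--
--     return text[:num_chars]
-- ===== SOURCE B (Python) =====
-- def generate_sample_text(num_chars=50000):
--     patterns = [
--         "The quick brown fox jumps over the lazy dog. ",
--         "Hello world! This is a test of the hybrid model. ",
--         "ABCDEFGHIJKLMNOPQRSTUVWXYZ. ",
--         "0123456789. ",
--         "The cat sat on the mat. The dog ran in the park. ",
--         "Once upon a time, in a land far away, there lived a wise old owl. ",
--         "To be or not to be, that is the question. ",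
--         "All that glitters is not gold. ",
--     ]
--     block = "".join(patterns)
--     if num_chars <= 0:
--         return ""
--     repeats = num_chars // len(block) + 1
--     return (block * repeats)[:num_chars]
-- ===== Notes on version B (the rewrite author's own statement) =====
-- stated objective: simpler
-- what changed: Replaces the while/for accumulation loop with break by joining the patterns once into a single block, computing repeats = num_chars // len(block) + 1, and slicing (block * repeats)[:num_chars] (guarding num_chars <= 0 to return '').
import Mathlib
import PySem

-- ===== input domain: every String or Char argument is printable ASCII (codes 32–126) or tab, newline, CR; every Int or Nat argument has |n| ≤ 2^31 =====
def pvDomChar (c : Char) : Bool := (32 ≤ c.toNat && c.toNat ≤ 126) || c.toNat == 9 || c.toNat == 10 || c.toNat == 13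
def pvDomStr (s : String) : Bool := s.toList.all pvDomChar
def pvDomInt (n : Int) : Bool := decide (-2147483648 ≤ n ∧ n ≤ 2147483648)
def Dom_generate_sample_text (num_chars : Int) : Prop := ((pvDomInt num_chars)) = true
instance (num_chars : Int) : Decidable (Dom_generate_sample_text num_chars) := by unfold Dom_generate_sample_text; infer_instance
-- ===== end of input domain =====

-- B replaces A's grow-and-break loops by joining the patterns once into one block and
-- slicing a prefix of enough whole-block repetitions (objective: simpler).


-- ===== PORT A =====
-- the literal `patterns` list (shared data between both ports, as code points)
def pvPats : List (List Char) :=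
  [ "The quick brown fox jumps over the lazy dog. ".toList,
    "Hello world! This is a test of the hybrid model. ".toList,
    "ABCDEFGHIJKLMNOPQRSTUVWXYZ. ".toList,
    "0123456789. ".toList,
    "The cat sat on the mat. The dog ran in the park. ".toList,
    "Once upon a time, in a land far away, there lived a wise old owl. ".toList,
    "To be or not to be, that is the question. ".toList,
    "All that glitters is not gold. ".toList ]

-- `for pattern in patterns: text += pattern; if len(text) >= num_chars: break`
def pvForA (num_chars : Int) : List (List Char) → List Char → List Char
  | [], text => text
  | p :: ps, text =>
    let t := text ++ p
    if num_chars ≤ (t.length : Int) then t else pvForA num_chars ps t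

-- each pass over pvForA with the full pattern list strictly grows the text (for termination)
lemma pvForA_len_le (num_chars : Int) (ps : List (List Char)) (t : List Char) :
    t.length ≤ (pvForA num_chars ps t).length := by
  induction ps generalizing t with
  | nil => simp [pvForA]
  | cons p ps ih =>
    simp only [pvForA]
    split
    · simp
    · exact le_trans (by simp) (ih (t ++ p))

lemma pvForA_grow_cons (num_chars : Int) (p : List Char) (ps : List (List Char))
    (t : List Char) (hp : p ≠ []) : t.length < (pvForA num_chars (p :: ps) t).length := by
  have hp' : 0 < p.length := List.length_pos_iff.mpr hp
  simp only [pvForA]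
  split
  · simp [hp']
  · exact lt_of_lt_of_le (by simp [hp']) (pvForA_len_le num_chars _ _)

lemma pvForA_grow (num_chars : Int) (t : List Char) :
    t.length < (pvForA num_chars pvPats t).length := by
  unfold pvPats
  exact pvForA_grow_cons num_chars _ _ t (by decide)

-- `while len(text) < num_chars: for pattern in patterns: …`
def pvWhileA (num_chars : Int) (text : List Char) : List Char :=
  if ((text.length : Int) < num_chars) then
    pvWhileA num_chars (pvForA num_chars pvPats text)
  else text
termination_by (num_chars - text.length).toNat
decreasing_by
  have := pvForA_grow num_chars text
  omega

def generate_sample_text (num_chars : Int) : String :=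
  String.ofList (PySem.List.slice (pvWhileA num_chars []) none (some num_chars))

-- ===== PORT B =====
def generate_sample_text_alt (num_chars : Int) : String :=
  let block := PySem.Chars.join [] pvPats        -- "".join(patterns)
  if num_chars ≤ 0 then "" else
    let repeats := PySem.Int.floordiv num_chars (block.length : Int) + 1
    -- block * repeats, then [:num_chars]
    String.ofList (PySem.List.slice (List.replicate repeats.toNat block).flatten none (some num_chars))

-- ===== PRECONDITION & SPEC =====
def Spec_generate_sample_text (num_chars : Int) (out : String) : Prop := out = generate_sample_text_alt num_chars
instance (num_chars : Int) (out : String) : Decidable (Spec_generate_sample_text num_chars out) := by unfold Spec_generate_sample_text; infer_instance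

-- ===== CLAIM (what is proved, stated in full; the proofs are below) =====
def Claim_equal_generate_sample_text : Prop := ∀ (num_chars : Int), Dom_generate_sample_text num_chars → Spec_generate_sample_text num_chars (generate_sample_text num_chars)

-- ===== LEMMAS AND PROOFS =====

def pvBlockPow (m : Nat) : List Char := (List.replicate m (PySem.Chars.join [] pvPats)).flatten

set_option maxRecDepth 4096 in
lemma pvJoin_eq_flatten : PySem.Chars.join [] pvPats = pvPats.flatten := by decide

set_option maxRecDepth 4096 in
lemma pvBlock_len : (PySem.Chars.join [] pvPats).length = 322 := by decide

lemma pvBlockPow_len (m : Nat) : (pvBlockPow m).length = m * 322 := by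
  simp only [pvBlockPow, List.length_flatten, List.map_replicate, List.sum_replicate,
    smul_eq_mul, pvBlock_len]

lemma pvBlockPow_succ (m : Nat) :
    pvBlockPow (m + 1) = pvBlockPow m ++ pvPats.flatten := by
  simp only [pvBlockPow, List.replicate_succ', List.flatten_append, pvJoin_eq_flatten]
  simp

lemma pvBlockPow_mono {m j : Nat} (h : m ≤ j) : pvBlockPow m <+: pvBlockPow j := by
  refine ⟨pvBlockPow (j - m), ?_⟩
  simp only [pvBlockPow, ← List.flatten_append, ← List.replicate_add]
  rw [Nat.add_sub_cancel' h]

lemma pvTake_of_prefix {l₁ l₂ : List Char} (k : Nat) (h : l₁ <+: l₂) (hk : k ≤ l₁.length) :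
    l₂.take k = l₁.take k := by
  obtain ⟨t, rfl⟩ := h
  exact List.take_append_of_le_length hk

lemma pvForA_spec (n : Int) (ps : List (List Char)) (t : List Char) :
    pvForA n ps t <+: t ++ ps.flatten ∧
      (n ≤ ((pvForA n ps t).length : Int) ∨ pvForA n ps t = t ++ ps.flatten) := by
  induction ps generalizing t with
  | nil => simp [pvForA]
  | cons p ps ih =>
    simp only [pvForA]
    split
    · refine ⟨⟨ps.flatten, by simp⟩, Or.inl (by assumption)⟩
    · have := ih (t ++ p)
      simpa [List.append_assoc] using this

lemma pvWhileA_spec (n : Int) (m : Nat) (h : ((pvBlockPow m).length : Int) < n) :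
    ∃ j, pvWhileA n (pvBlockPow m) <+: pvBlockPow j ∧
      n ≤ ((pvWhileA n (pvBlockPow m)).length : Int) := by
  rw [pvWhileA, if_pos h]
  obtain ⟨hpre, hdis⟩ := pvForA_spec n pvPats (pvBlockPow m)
  rw [← pvBlockPow_succ] at hpre
  rcases hdis with hlen | heq
  · refine ⟨m + 1, ?_, ?_⟩ <;> rw [pvWhileA, if_neg (by omega)]
    · exact hpre
    · exact hlen
  · rw [heq, ← pvBlockPow_succ]
    by_cases h' : ((pvBlockPow (m + 1)).length : Int) < n
    · exact pvWhileA_spec n (m + 1) h'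
    · exact ⟨m + 1, by rw [pvWhileA, if_neg h']; exact ⟨List.prefix_rfl, by omega⟩⟩
termination_by (n - (pvBlockPow m).length).toNat
decreasing_by
  have h1 := pvBlockPow_len m
  have h2 := pvBlockPow_len (m + 1)
  omega

-- ===== VERDICT (by name: the statement is the Claim_ definition above) =====
theorem generate_sample_text_spec : Claim_equal_generate_sample_text := by
  unfold Claim_equal_generate_sample_text Spec_generate_sample_text
  intro n _
  unfold generate_sample_text generate_sample_text_alt
  by_cases hn : n ≤ 0
  · rw [if_pos hn, pvWhileA, if_neg (by simpa using hn)]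
    simp [PySem.List.slice]
  · rw [if_neg hn]
    have hlen322 : (((PySem.Chars.join [] pvPats).length : Nat) : Int) = 322 := by
      rw [pvBlock_len]; norm_num
    have h0 : pvBlockPow 0 = ([] : List Char) := by simp [pvBlockPow]
    obtain ⟨j, hpre, hlen⟩ := pvWhileA_spec n 0 (by rw [pvBlockPow_len]; omega)
    rw [h0] at hpre hlen
    simp only [hlen322]
    set f := PySem.Int.floordiv n 322 with hf
    have hfnonneg : 0 ≤ f := by
      rw [hf, PySem.Int.floordiv_eq_ediv_of_pos (by omega)]
      exact Int.ediv_nonneg (by omega) (by omega)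
    have hmod := PySem.Int.floordiv_mul_add_mod n 322
    have hmodlt := PySem.Int.mod_lt n (b := (322 : Int)) (by omega)
    have hR : n ≤ (((f + 1).toNat * 322 : Nat) : Int) := by push_cast; omega
    have hBeq : (List.replicate (f + 1).toNat (PySem.Chars.join [] pvPats)).flatten
        = pvBlockPow (f + 1).toNat := rfl
    rw [hBeq]
    rw [PySem.List.slice_to _ (by omega), PySem.List.slice_to _ (by omega)]
    have hnlen1 : n.toNat ≤ (pvWhileA n []).length := by omega
    have hnlen2 : n.toNat ≤ (pvBlockPow (f + 1).toNat).length := by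
      rw [pvBlockPow_len]; omega
    have e1 : (pvWhileA n []).take n.toNat
        = (pvBlockPow (max j (f + 1).toNat)).take n.toNat := by
      rw [← pvTake_of_prefix n.toNat hpre hnlen1]
      exact (pvTake_of_prefix n.toNat (pvBlockPow_mono (le_max_left _ _))
        (le_trans hnlen1 hpre.length_le)).symm
    have e2 : (pvBlockPow (f + 1).toNat).take n.toNat
        = (pvBlockPow (max j (f + 1).toNat)).take n.toNat :=
      (pvTake_of_prefix n.toNat (pvBlockPow_mono (le_max_right _ _)) hnlen2).symm
    rw [e1, e2]
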